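-- pv_equiv track=rewrite | github.com/OLC-Bioinformatics/COWBAT | OLCspades/GeneSeekr.py | interleaveblastresults
-- ===== SOURCE A (Python) =====
-- def interleaveblastresults(query, subject):
--     """
--     Creates an interleaved string that resembles BLAST sequence comparisons
--     :param query: Query sequence
--     :param subject: Subject sequence
--     :return: Properly formatted BLAST-like sequence comparison
--     """
--     # Initialise strings to hold the matches, and the final BLAST-formatted string
--     matchstring = ''
--     blaststring = ''
--     # Iterate through the query
--     for i, bp in enumerate(query):
--         # If the current base in the query is identical to the corresponding base in the reference, append a '|'
--         # to the match string, otherwise, append a ' '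
--         if bp == subject[i]:
--             matchstring += '|'
--         else:
--             matchstring += ' '
--     # Set a variable to store the progress through the sequence
--     prev = 0
--     # Iterate through the query, from start to finish in steps of 60 bp
--     for j in range(0, len(query), 60):
--         # BLAST results string. The components are: current position (padded to four characters), 'OLC', query
--         # sequence, \n, matches, \n, 'ref', subject sequence. Repeated until all the sequence data are present.
--         """
--         0000 OLC ATGAAGAAGATATTTGTAGCGGCTTTATTTGCTTTTGTTTCTGTTAATGCAATGGCAGCT
--                  ||||||||||| ||| | |||| ||||||||| || ||||||||||||||||||||||||
--              ref ATGAAGAAGATGTTTATGGCGGTTTTATTTGCATTAGTTTCTGTTAATGCAATGGCAGCT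
--         0060 OLC GATTGTGCAAAAGGTAAAATTGAGTTCTCTAAGTATAATGAGAATGATACATTCACAGTA
--                  ||||||||||||||||||||||||||||||||||||||||||||||||||||||||||||
--              ref GATTGTGCAAAAGGTAAAATTGAGTTCTCTAAGTATAATGAGAATGATACATTCACAGTA
--         """
--         blaststring += '{} OLC {}\n         {}\n     ref {}\n' \
--             .format('{:04d}'.format(j), query[prev:j + 60], matchstring[prev:j + 60], subject[prev:j + 60])
--         # Update the progress variable
--         prev = j + 60
--     # Return the properly formatted string
--     return blaststring
-- ===== SOURCE B (Python) =====
-- def interleaveblastresults(query, subject):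
--     """
--     Creates an interleaved string that resembles BLAST sequence comparisons
--     :param query: Query sequence
--     :param subject: Subject sequence
--     :return: Properly formatted BLAST-like sequence comparison
--     """
--     # Divide and conquer on the aligned pair: a region of at most 60 bp is one
--     # formatted block (its match line built by direct per-base comparison);
--     # a longer region is split at a 60-bp boundary and the two halves are
--     # formatted independently and concatenated.  No full-length matchstring,
--     # no index loop over range(0, len, 60).
--     def build(q, s, pos):
--         if not q:
--             return ''
--         if len(q) <= 60:
--             match = ''.join('|' if a == b else ' ' for a, b in zip(q, s))
--             return '%04d OLC %s\n         %s\n     ref %s\n' % (pos, q, match, s[:60])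
--         half = ((len(q) + 59) // 60) // 2
--         mid = 60 * half
--         return build(q[:mid], s[:mid], pos) + build(q[mid:], s[mid:], pos + mid)
--     return build(query, subject, 0)
-- ===== Notes on version B (the rewrite author's own statement) =====
-- stated objective: alternative
-- what changed: A's two staged linear passes (full-length matchstring, then an indexed range(0,len,60) loop with a prev cursor) are replaced by divide-and-conquer recursion on the aligned pair: a region of at most 60 bp is formatted directly with a locally built match line, a longer region is split at a 60-bp boundary and the halves' results concatenated.
import Mathlib
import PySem

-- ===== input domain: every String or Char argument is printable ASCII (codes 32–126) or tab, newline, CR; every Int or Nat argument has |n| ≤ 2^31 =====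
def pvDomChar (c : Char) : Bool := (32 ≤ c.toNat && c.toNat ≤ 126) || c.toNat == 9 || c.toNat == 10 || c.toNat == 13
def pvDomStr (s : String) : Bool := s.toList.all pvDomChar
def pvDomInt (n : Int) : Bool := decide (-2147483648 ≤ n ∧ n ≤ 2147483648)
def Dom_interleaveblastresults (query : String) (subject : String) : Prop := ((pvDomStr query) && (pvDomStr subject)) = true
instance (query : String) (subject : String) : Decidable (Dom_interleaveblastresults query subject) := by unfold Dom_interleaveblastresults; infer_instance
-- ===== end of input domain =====

-- B replaces A's two staged linear passes (full matchstring, then an indexed 60-bp range loop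
-- with a prev cursor) by divide-and-conquer recursion on the aligned pair (objective: alternative).

-- ===== PORT A =====
def interleaveblastresults (query : String) (subject : String) : String :=
  let q := query.toList
  let s := subject.toList
  -- for i, bp in enumerate(query): matchstring += '|' or ' '  (subject[i]: in range under Pre_)
  let matchstring : List Char :=
    (PySem.List.enumerate q).foldl
      (fun ms p => ms ++ [if p.2 == PySem.List.pyGetD s p.1 ' ' then '|' else ' ']) []
  -- for j in range(0, len(query), 60), loop state = (blaststring, prev)
  let final :=
    (PySem.List.pyRange 0 (PySem.List.len q) 60).foldl
      (fun (st : List Char × Int) j =>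
        (st.1
          ++ PySem.Chars.zfill (PySem.Int.toChars j) 4      -- '{:04d}'.format(j), j ≥ 0 here
          ++ (" OLC ").toList
          ++ PySem.List.slice q (some st.2) (some (j + 60))
          ++ ("\n         ").toList
          ++ PySem.List.slice matchstring (some st.2) (some (j + 60))
          ++ ("\n     ref ").toList
          ++ PySem.List.slice s (some st.2) (some (j + 60))
          ++ ("\n").toList,
         j + 60))
      ([], 0)
  String.ofList final.1

-- ===== PORT B =====
-- build(q, s, pos): a region of at most 60 bp is one block whose match line is zipped locally;
-- a longer region is split at a 60-bp boundary and the two halves' results are concatenated.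
def pvBuild : Nat → List Char → List Char → Int → List Char
  | 0, _, _, _ => []          -- fuel 0 is never reached: fuel starts at len(query) (totality device)
  | fuel + 1, q, s, pos =>
    if q = [] then []
    else if q.length ≤ 60 then
      PySem.Chars.zfill (PySem.Int.toChars pos) 4            -- '%04d' % pos, pos ≥ 0 here
        ++ (" OLC ").toList
        ++ q
        ++ ("\n         ").toList
        ++ (q.zip s).map (fun p => if p.1 == p.2 then '|' else ' ')
        ++ ("\n     ref ").toList
        ++ s.take 60                                          -- s[:60]
        ++ ("\n").toList
    else
      -- half = ((len(q) + 59) // 60) // 2; mid = 60 * half (inlined)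
      pvBuild fuel (q.take (60 * ((q.length + 59) / 60 / 2))) (s.take (60 * ((q.length + 59) / 60 / 2))) pos
        ++ pvBuild fuel (q.drop (60 * ((q.length + 59) / 60 / 2))) (s.drop (60 * ((q.length + 59) / 60 / 2)))
             (pos + ((60 * ((q.length + 59) / 60 / 2) : Nat) : Int))

def interleaveblastresults_alt (query : String) (subject : String) : String :=
  String.ofList (pvBuild query.toList.length query.toList subject.toList 0)

-- ===== PRECONDITION & SPEC =====
-- Python A indexes subject[i] for every i < len(query), so it raises IndexError exactly when
-- the subject is shorter than the query; Pre_ excludes those inputs (Python B returns the truncated-match string there).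
def Pre_interleaveblastresults (query : String) (subject : String) : Prop :=
  query.toList.length ≤ subject.toList.length
instance (query : String) (subject : String) : Decidable (Pre_interleaveblastresults query subject) := by
  unfold Pre_interleaveblastresults; infer_instance

def pvWitness_interleaveblastresults : String × String := ("ACGT", "ACCT")

def Spec_interleaveblastresults (query : String) (subject : String) (out : String) : Prop := out = interleaveblastresults_alt query subject
instance (query : String) (subject : String) (out : String) : Decidable (Spec_interleaveblastresults query subject out) := by unfold Spec_interleaveblastresults; infer_instance

-- ===== CLAIM (what is proved, stated in full; the proofs are below) =====
def Claim_equal_interleaveblastresults : Prop := ∀ (query : String) (subject : String), Dom_interleaveblastresults query subject → Pre_interleaveblastresults query subject → Spec_interleaveblastresults query subject (interleaveblastresults query subject)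

-- ===== LEMMAS AND PROOFS =====

-- One 60-bp block in "local coordinates": the chunk starting j characters into the remaining
-- aligned pair (q, s), printed at absolute position pos + j.
def pvChunkL (q s : List Char) (j : Nat) (pos : Int) : List Char :=
  PySem.Chars.zfill (PySem.Int.toChars (pos + (j : Int))) 4
    ++ (" OLC ").toList
    ++ (q.drop j).take 60
    ++ ("\n         ").toList
    ++ (((q.drop j).take 60).zip ((s.drop j).take 60)).map (fun p => if p.1 == p.2 then '|' else ' ')
    ++ ("\n     ref ").toList
    ++ (s.drop j).take 60
    ++ ("\n").toList

-- A's j-th block in "global coordinates": slices of the full q and s, the match window as a map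
-- over pyRange j (min (j+60) len q) of the per-position comparison g.
def pvBlockG (q s : List Char) (g : Int → Char) (j : Int) : List Char :=
  PySem.Chars.zfill (PySem.Int.toChars j) 4
    ++ (" OLC ").toList
    ++ PySem.List.slice q (some j) (some (j + 60))
    ++ ("\n         ").toList
    ++ (PySem.List.pyRange j (min (j + 60) (q.length : Int)) 1).map g
    ++ ("\n     ref ").toList
    ++ PySem.List.slice s (some j) (some (j + 60))
    ++ ("\n").toList

def pvNumChunks (m : Nat) : Nat := (m + 59) / 60

-- Slicing the window [a, a+60) out of a map over range(0, n) is the map over range(a, min(a+60, n)).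
lemma pv_slice_map_pyRange {α : Type} (g : Int → α) (n a : Int) (hn : 0 ≤ n) (ha : 0 ≤ a) :
    PySem.List.slice ((PySem.List.pyRange 0 n 1).map g) (some a) (some (a + 60))
      = (PySem.List.pyRange a (min (a + 60) n) 1).map g := by
  rw [PySem.List.slice_toNat _ ha (by omega)]
  apply List.ext_getElem
  · simp [PySem.List.length_pyRange_one]
    omega
  · intro i h1 h2
    simp only [List.getElem_take, List.getElem_drop, List.getElem_map]
    rw [PySem.List.getElem_pyRange_one, PySem.List.getElem_pyRange_one]
    congr 1
    simp [PySem.List.length_pyRange_one, List.length_take, List.length_drop] at h1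
    omega

-- A's fold with the `prev` cursor equals the fold appending, for each chunk start j, the
-- self-contained global block pvBlockG: `prev` is always the current chunk start.
lemma pv_loop_eq (q s : List Char) (g : Int → Char) (n : Nat) :
    ∀ (a : Int), 0 ≤ a → ∀ (acc : List Char),
    (((List.range n).map (fun k : Nat => a + 60 * (k : Int))).foldl
      (fun (st : List Char × Int) j =>
        (st.1
          ++ PySem.Chars.zfill (PySem.Int.toChars j) 4
          ++ (" OLC ").toList
          ++ PySem.List.slice q (some st.2) (some (j + 60))
          ++ ("\n         ").toList
          ++ PySem.List.slice ((PySem.List.pyRange 0 (q.length : Int) 1).map g) (some st.2) (some (j + 60))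
          ++ ("\n     ref ").toList
          ++ PySem.List.slice s (some st.2) (some (j + 60))
          ++ ("\n").toList,
         j + 60))
      (acc, a)).1
    = ((List.range n).map (fun k : Nat => a + 60 * (k : Int))).foldl
      (fun acc j => acc ++ pvBlockG q s g j) acc := by
  induction n with
  | zero => intro a ha acc; rfl
  | succ m ih =>
    intro a ha acc
    have hshift : (List.range (m + 1)).map (fun k : Nat => a + 60 * (k : Int))
        = a :: (List.range m).map (fun k : Nat => (a + 60) + 60 * (k : Int)) := by
      apply List.ext_getElem
      · simp
      · intro i h1 h2
        cases i with
        | zero => simp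
        | succ i =>
          simp only [List.getElem_map, List.getElem_range, List.getElem_cons_succ]
          push_cast
          ring
    rw [hshift]
    simp only [List.foldl_cons]
    rw [ih (a + 60) (by omega)]
    have hacc : acc ++ PySem.Chars.zfill (PySem.Int.toChars a) 4 ++ (" OLC ").toList
        ++ PySem.List.slice q (some a) (some (a + 60)) ++ ("\n         ").toList
        ++ PySem.List.slice ((PySem.List.pyRange 0 (q.length : Int) 1).map g) (some a) (some (a + 60))
        ++ ("\n     ref ").toList ++ PySem.List.slice s (some a) (some (a + 60)) ++ ("\n").toList
        = acc ++ pvBlockG q s g a := by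
      rw [pv_slice_map_pyRange g _ a (by positivity) ha]
      simp [pvBlockG]
    rw [hacc]

-- With the per-position comparison of A's matchstring, the global block at a Nat start j
-- (j < len q ≤ len s) IS the local chunk pvChunkL q s j 0.
lemma pv_block_eq_chunkL (q s : List Char) (j : Nat)
    (hj : j < q.length) (hls : q.length ≤ s.length) :
    pvBlockG q s (fun k => if PySem.List.pyGetD q k ' ' == PySem.List.pyGetD s k ' ' then '|' else ' ')
        ((j : Nat) : Int)
      = pvChunkL q s j 0 := by
  unfold pvBlockG pvChunkL
  have hq : PySem.List.slice q (some (j : Int)) (some ((j : Int) + 60)) = (q.drop j).take 60 := by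
    rw [PySem.List.slice_toNat _ (by positivity) (by positivity)]
    congr 1
    omega
  have hs : PySem.List.slice s (some (j : Int)) (some ((j : Int) + 60)) = (s.drop j).take 60 := by
    rw [PySem.List.slice_toNat _ (by positivity) (by positivity)]
    congr 1
    omega
  have hm : (PySem.List.pyRange (j : Int) (min ((j : Int) + 60) (q.length : Int)) 1).map
        (fun k => if PySem.List.pyGetD q k ' ' == PySem.List.pyGetD s k ' ' then '|' else ' ')
      = (((q.drop j).take 60).zip ((s.drop j).take 60)).map (fun p => if p.1 == p.2 then '|' else ' ') := by
    apply List.ext_getElem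
    · simp [PySem.List.length_pyRange_one]
      omega
    · intro i h1 h2
      simp only [List.getElem_map, List.getElem_zip, List.getElem_take, List.getElem_drop]
      rw [PySem.List.getElem_pyRange_one]
      have hi : (j : Int) + (i : Int) = ((j + i : Nat) : Int) := by push_cast; ring
      have hrange : j + i < q.length := by
        simp [PySem.List.length_pyRange_one] at h1
        omega
      rw [hi, PySem.List.pyGetD_natCast, PySem.List.pyGetD_natCast]
      simp [List.getD, List.getElem?_eq_getElem hrange,
            List.getElem?_eq_getElem (by omega : j + i < s.length)]
  rw [hq, hs, hm, Int.zero_add]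

-- A chunk entirely inside the first mid characters ignores the truncation to mid characters.
lemma pvChunkL_take (q s : List Char) (j mid : Nat) (pos : Int) (hjm : j + 60 ≤ mid) :
    pvChunkL (q.take mid) (s.take mid) j pos = pvChunkL q s j pos := by
  unfold pvChunkL
  simp only [List.drop_take, List.take_take]
  have h60 : min 60 (mid - j) = 60 := by omega
  simp only [h60]

-- A chunk of the right half, re-indexed: dropping mid characters shifts the start by mid.
lemma pvChunkL_drop (q s : List Char) (j mid : Nat) (pos : Int) :
    pvChunkL (q.drop mid) (s.drop mid) j (pos + (mid : Int)) = pvChunkL q s (mid + j) pos := by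
  unfold pvChunkL
  simp only [List.drop_drop]
  have hz : pos + (mid : Int) + (j : Int) = pos + ((mid + j : Nat) : Int) := by push_cast; ring
  rw [hz]

-- B's divide-and-conquer build equals the left-to-right concatenation of the local chunks
-- (for any sufficient fuel).
lemma pv_build_linear : ∀ (fuel : Nat) (q s : List Char), q.length ≤ fuel → q.length ≤ s.length →
    ∀ (pos : Int),
    pvBuild fuel q s pos
      = (List.range (pvNumChunks q.length)).flatMap (fun k => pvChunkL q s (60 * k) pos) := by
  intro fuel
  induction fuel with
  | zero =>
    intro q s hf hls pos
    have hq0 : q = [] := List.eq_nil_of_length_eq_zero (by omega)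
    subst hq0
    simp [pvBuild, pvNumChunks]
  | succ f ih =>
    intro q s hf hls pos
    simp only [pvBuild]
    by_cases hq0 : q = []
    · subst hq0
      simp [pvNumChunks]
    · rw [if_neg hq0]
      have hqpos : 0 < q.length := List.length_pos_iff.mpr hq0
      by_cases hle : q.length ≤ 60
      · rw [if_pos hle]
        have hc : pvNumChunks q.length = 1 := by unfold pvNumChunks; omega
        rw [hc]
        simp only [List.range_one, List.flatMap_cons, List.flatMap_nil, List.append_nil,
          Nat.mul_zero]
        unfold pvChunkL
        simp only [List.drop_zero, Nat.cast_zero, Int.add_zero]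
        have hqt : q.take 60 = q := List.take_of_length_le hle
        have hz : q.zip s = (q.take 60).zip (s.take 60) := by
          apply List.ext_getElem
          · simp
            omega
          · intro i h1 h2
            simp [List.getElem_zip, List.getElem_take]
        rw [hz, hqt]
      · rw [if_neg hle]
        have h61 : 61 ≤ q.length := by omega
        have hc2 : 2 ≤ pvNumChunks q.length := by unfold pvNumChunks; omega
        set c := pvNumChunks q.length with hcdef
        set mid := 60 * ((q.length + 59) / 60 / 2) with hmiddef
        have hcq : c = (q.length + 59) / 60 := by rw [hcdef]; rfl
        have hmh : mid = 60 * (c / 2) := by rw [hmiddef, hcq]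
        have hmlt : mid < q.length := by omega
        have hmge : 60 ≤ mid := by omega
        have hltq : (q.take mid).length = mid := by simp; omega
        have h1 := ih (q.take mid) (s.take mid) (by simp; omega) (by simp; omega) pos
        have h2 := ih (q.drop mid) (s.drop mid) (by simp; omega) (by simp; omega)
          (pos + (mid : Int))
        rw [h1, h2, hltq]
        have hcl : pvNumChunks mid = c / 2 := by unfold pvNumChunks; omega
        have hcr : pvNumChunks (q.drop mid).length = c - c / 2 := by
          simp only [List.length_drop]
          unfold pvNumChunks
          omega
        rw [hcl, hcr]
        have hsplit : List.range c = List.range (c / 2) ++ (List.range (c - c / 2)).map (c / 2 + ·) := by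
          rw [← List.range_add]
          congr 1
          omega
        rw [hsplit, List.flatMap_append, List.flatMap_map]
        congr 1
        · -- left half: every chunk k < c / 2 lies inside the first mid characters
          simp only [List.flatMap_def]
          apply congrArg List.flatten
          apply List.map_congr_left
          intro k hk
          have hk' : k < c / 2 := List.mem_range.mp hk
          exact pvChunkL_take q s (60 * k) mid pos (by omega)
        · -- right half: drop mid shifts the chunk start by mid = 60 * (c / 2)
          simp only [List.flatMap_def]
          apply congrArg List.flatten
          apply List.map_congr_left
          intro k hk
          rw [pvChunkL_drop q s (60 * k) mid pos]
          congr 1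
          omega

-- The two ports agree whenever the subject is at least as long as the query.
lemma pv_ports_eq (query subject : String)
    (hls : query.toList.length ≤ subject.toList.length) :
    interleaveblastresults query subject = interleaveblastresults_alt query subject := by
  simp only [interleaveblastresults, interleaveblastresults_alt]
  congr 1
  rw [PySem.List.foldl_append_singleton_eq_map
        (fun p : Int × Char => if p.2 == PySem.List.pyGetD subject.toList p.1 ' ' then '|' else ' '),
      PySem.List.enumerate_eq_map_pyRange query.toList ' ', List.map_map, List.nil_append]
  rw [PySem.List.pyRange_of_pos 0 (PySem.List.len query.toList) (by norm_num : (0:Int) < 60)]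
  simp only [PySem.List.len_eq]
  set g := ((fun p : Int × Char => if p.2 == PySem.List.pyGetD subject.toList p.1 ' ' then '|' else ' ')
        ∘ (fun j => (j, PySem.List.pyGetD query.toList j ' '))) with hg
  set n := (if (0:Int) < (query.toList.length : Int)
      then (((query.toList.length : Int) - 0 + 60 - 1) / 60).toNat else 0) with hn
  have hloop := pv_loop_eq query.toList subject.toList g n 0 le_rfl []
  simp only [zero_add] at hloop ⊢
  rw [hloop, PySem.List.foldl_append_eq_flatMap
        (pvBlockG query.toList subject.toList g), List.nil_append, List.flatMap_map]
  have hnn : n = pvNumChunks query.toList.length := by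
    rw [hn]; unfold pvNumChunks
    by_cases h0 : 0 < query.toList.length
    · rw [if_pos (by exact_mod_cast h0)]
      omega
    · rw [if_neg (by exact_mod_cast h0)]
      omega
  rw [pv_build_linear query.toList.length query.toList subject.toList le_rfl hls 0, ← hnn]
  simp only [List.flatMap_def]
  apply congrArg List.flatten
  apply List.map_congr_left
  intro k hk
  have hk' : k < n := List.mem_range.mp hk
  have hkl : 60 * k < query.toList.length := by
    rw [hnn] at hk'
    unfold pvNumChunks at hk'
    omega
  have hcast : (60 : Int) * (k : Int) = ((60 * k : Nat) : Int) := by push_cast; ring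
  rw [hcast]
  have hgfun : g = (fun j => if PySem.List.pyGetD query.toList j ' ' ==
      PySem.List.pyGetD subject.toList j ' ' then '|' else ' ') := by
    rw [hg]; rfl
  rw [hgfun]
  exact pv_block_eq_chunkL query.toList subject.toList (60 * k) hkl hls

-- ===== VERDICT (by name: the statements are the Claim_ definitions above) =====
theorem interleaveblastresults_spec : Claim_equal_interleaveblastresults := by
  intro query subject _ hpre
  unfold Spec_interleaveblastresults
  exact pv_ports_eq query subject hpre
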